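-- pv_equiv track=rewrite | github.com/alo1719/LeetCode | 798.smallest-rotation-with-highest-score.py | bestRotation
-- ===== SOURCE A (Python) =====
-- from typing import List
--
-- def bestRotation(nums: List[int]) -> int:
--     n = len(nums)
--     diff = [0] * n
--     for i, num in enumerate(nums):
--         low = (i + 1) % n # Remember
--         high = (i - num + n + 1) % n # Remember
--         diff[low] += 1
--         diff[high] -= 1
--         if low >= high:
--             diff[0] += 1
--     max_score, now_score, ans = 0, 0, -1
--     for i in range(n):
--         now_score += diff[i]
--         if now_score > max_score:
--             max_score = now_score
--             ans = i
--     return ans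
-- ===== SOURCE B (Python) =====
-- from typing import List
--
-- def bestRotation(nums: List[int]) -> int:
--     n = len(nums)
--     # c[r] = how many elements stop scoring when the rotation passes residue r
--     c = [0] * n
--     for j, v in enumerate(nums):
--         c[(j - v % n) % n] += 1
--     # score of rotation 0, counted directly
--     s = sum(1 for j, v in enumerate(nums) if v % n <= j)
--     best, ans = 0, -1
--     for k in range(n):
--         if k:
--             s += 1 - c[k - 1]
--         if s > best:
--             best, ans = s, k
--     return ans
-- ===== Notes on version B (the rewrite author's own statement) =====
-- stated objective: alternative
-- what changed: Replaces the interval difference array + prefix-sum scan with a per-residue counter and the incremental recurrence score(k) = score(k-1) + 1 - c[k-1], starting from a directly counted score(0).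
import Mathlib
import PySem

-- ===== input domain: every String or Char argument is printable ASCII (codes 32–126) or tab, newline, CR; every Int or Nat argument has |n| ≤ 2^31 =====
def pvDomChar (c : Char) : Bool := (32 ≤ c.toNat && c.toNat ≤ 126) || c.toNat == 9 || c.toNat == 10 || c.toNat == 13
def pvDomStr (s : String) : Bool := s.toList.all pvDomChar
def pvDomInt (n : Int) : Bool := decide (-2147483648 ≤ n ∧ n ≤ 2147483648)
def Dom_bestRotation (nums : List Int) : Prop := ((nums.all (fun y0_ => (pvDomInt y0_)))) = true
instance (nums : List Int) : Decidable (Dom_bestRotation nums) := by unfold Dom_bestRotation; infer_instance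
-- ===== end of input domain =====

-- B replaces A's interval difference array + prefix-sum scan by a per-residue counter with the
-- incremental recurrence score(k) = score(k-1) + 1 - c[k-1] (alternative O(n) algorithm).

-- ===== PORT A =====
-- one enumerate step of A's first loop: the two ± updates of diff plus the wrap adjustment
def pvStepA (n : Int) (d : List Int) (p : Int × Int) : List Int :=
  let low := PySem.Int.mod (p.1 + 1) n
  let high := PySem.Int.mod (p.1 - p.2 + n + 1) n
  let d1 := PySem.List.pySetD d low (PySem.List.pyGetD d low 0 + 1)
  let d2 := PySem.List.pySetD d1 high (PySem.List.pyGetD d1 high 0 - 1)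
  if low ≥ high then PySem.List.pySetD d2 0 (PySem.List.pyGetD d2 0 0 + 1) else d2

def bestRotation (nums : List Int) : Int :=
  let n : Int := nums.length
  let diff := (PySem.List.enumerate nums).foldl (pvStepA n) (List.replicate nums.length 0)
  let fin := (PySem.List.pyRange 0 n 1).foldl
    (fun (s : Int × Int × Int) i =>
      let now := s.2.1 + PySem.List.pyGetD diff i 0
      if now > s.1 then (now, now, i) else (s.1, now, s.2.2)) (0, 0, -1)
  fin.2.2

-- ===== PORT B =====
-- c[(j - v % n) % n] += 1
def pvStepC (n : Int) (c : List Int) (p : Int × Int) : List Int :=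
  let r := PySem.Int.mod (p.1 - PySem.Int.mod p.2 n) n
  PySem.List.pySetD c r (PySem.List.pyGetD c r 0 + 1)

def bestRotation_alt (nums : List Int) : Int :=
  let n : Int := nums.length
  let c := (PySem.List.enumerate nums).foldl (pvStepC n) (List.replicate nums.length 0)
  -- s = sum(1 for j, v in enumerate(nums) if v % n <= j)
  let s0 := ((PySem.List.enumerate nums).map
      (fun p => if PySem.Int.mod p.2 n ≤ p.1 then (1 : Int) else 0)).sum
  let fin := (PySem.List.pyRange 0 n 1).foldl
    (fun (st : Int × Int × Int) k =>
      let s := if k ≠ 0 then st.1 + 1 - PySem.List.pyGetD c (k - 1) 0 else st.1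
      if s > st.2.1 then (s, s, k) else (s, st.2.1, st.2.2)) (s0, 0, -1)
  fin.2.2

-- ===== PRECONDITION & SPEC =====
def Spec_bestRotation (nums : List Int) (out : Int) : Prop := out = bestRotation_alt nums
instance (nums : List Int) (out : Int) : Decidable (Spec_bestRotation nums out) := by unfold Spec_bestRotation; infer_instance

-- ===== CLAIM (what is proved, stated in full; the proofs are below) =====
def Claim_equal_bestRotation : Prop := ∀ (nums : List Int), Dom_bestRotation nums → Spec_bestRotation nums (bestRotation nums)

-- ===== LEMMAS AND PROOFS =====

-- the score of rotation k, as a direct count (proof-side abstraction both ports are reduced to)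
def pvScore (nums : List Int) (k : Int) : Int :=
  ((PySem.List.enumerate nums).map (fun p =>
      if PySem.Int.mod p.2 (nums.length : Int) ≤ PySem.Int.mod (p.1 - k) (nums.length : Int)
      then (1 : Int) else 0)).sum

-- prefix sum of the first m entries of a diff array
def pvP (m : Nat) (d : List Int) : Int := ((List.range m).map (fun i => d.getD i 0)).sum

theorem pvP_succ (m : Nat) (d : List Int) : pvP (m + 1) d = pvP m d + d.getD m 0 := by
  simp [pvP, List.range_succ]

theorem pv_getD_set (d : List Int) (c : Nat) (x : Int) (i : Nat) (h : c < d.length) :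
    (d.set c x).getD i 0 = if i = c then x else d.getD i 0 := by
  simp only [List.getD_eq_getElem?_getD, List.getElem?_set]
  split
  · rename_i h2; simp [← h2]
  · rename_i h2; rw [if_neg (fun hh => h2 hh.symm)]

theorem pvP_set (d : List Int) (c : Nat) (x : Int) (m : Nat) (hc : c < d.length) :
    pvP m (d.set c x) = pvP m d + (if c < m then x - d.getD c 0 else 0) := by
  induction m with
  | zero => simp [pvP]
  | succ m ih =>
    rw [pvP_succ, pvP_succ, ih, pv_getD_set d c x m hc]
    by_cases h1 : m = c
    · subst h1; rw [if_neg (by omega), if_pos rfl, if_pos (by omega)]; ring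
    · rw [if_neg h1]
      by_cases h2 : c < m
      · rw [if_pos h2, if_pos (by omega)]; ring
      · rw [if_neg h2, if_neg (by omega)]; ring

-- x % n = x  /  congruence mod n
theorem pv_mod_small (n x : Int) (hn : 0 < n) (h1 : 0 ≤ x) (h2 : x < n) : PySem.Int.mod x n = x := by
  rw [PySem.Int.mod_eq_emod_of_pos hn]; exact Int.emod_eq_of_lt h1 h2

theorem pv_mod_add_mul (n x t : Int) (hn : 0 < n) : PySem.Int.mod (x + n * t) n = PySem.Int.mod x n := by
  rw [PySem.Int.mod_eq_emod_of_pos hn, PySem.Int.mod_eq_emod_of_pos hn]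
  simp [Int.add_mul_emod_self_left]

-- reduce a mod known to lie in (-n, n) to an if
theorem pv_mod_range (n x : Int) (hn : 0 < n) (h1 : -n ≤ x) (h2 : x < n) :
    PySem.Int.mod x n = if 0 ≤ x then x else x + n := by
  split
  · exact pv_mod_small n x hn (by assumption) h2
  · have h3 := pv_mod_add_mul n (x + n) (-1) hn
    have h4 : x + n + n * (-1) = x := by ring
    rw [h4] at h3
    rw [h3]
    exact pv_mod_small n (x + n) hn (by omega) (by omega)

theorem pv_pyGetD (xs : List Int) (i : Int) (h : 0 ≤ i) : PySem.List.pyGetD xs i 0 = xs.getD i.toNat 0 := by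
  rw [show i = ((i.toNat : Nat) : Int) from (Int.toNat_of_nonneg h).symm]
  rw [PySem.List.pyGetD_natCast]
  simp [Int.toNat_of_nonneg h]

theorem pv_mod_self (n : Int) (hn : 0 < n) : PySem.Int.mod n n = 0 := by
  have h := pv_mod_add_mul n 0 1 hn
  have h2 : (0 : Int) + n * 1 = n := by ring
  rw [h2] at h
  rw [h]
  exact pv_mod_small n 0 hn le_rfl hn

-- the heart of the A side: the three diff-indicators summed over 0..k equal the scoring predicate
theorem pvArith (n j v k : Int) (hn : 0 < n) (hj1 : 0 ≤ j) (hj2 : j < n) (hk1 : 0 ≤ k) (hk2 : k < n) :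
    ((if PySem.Int.mod (j + 1) n ≤ k then (1 : Int) else 0)
      - (if PySem.Int.mod (j - v + n + 1) n ≤ k then (1 : Int) else 0)
      + (if PySem.Int.mod (j - v + n + 1) n ≤ PySem.Int.mod (j + 1) n then (1 : Int) else 0))
    = (if PySem.Int.mod v n ≤ PySem.Int.mod (j - k) n then (1 : Int) else 0) := by
  have hW1 : 0 ≤ PySem.Int.mod v n := PySem.Int.mod_nonneg v hn
  have hW2 : PySem.Int.mod v n < n := PySem.Int.mod_lt v hn
  have hveq : PySem.Int.mod v n = v - n * (v / n) := by
    have h := Int.emod_add_mul_ediv v n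
    rw [PySem.Int.mod_eq_emod_of_pos hn]; linarith
  have hL : PySem.Int.mod (j + 1) n = if j + 1 = n then 0 else j + 1 := by
    split
    · rename_i h; rw [h]; exact pv_mod_self n hn
    · exact pv_mod_small n _ hn (by omega) (by omega)
  have hH0 : j - v + n + 1 = (j + 1 - PySem.Int.mod v n) + n * (1 - v / n) := by rw [hveq]; ring
  have hH : PySem.Int.mod (j - v + n + 1) n
      = if j + 1 - PySem.Int.mod v n = n then 0
        else if 0 ≤ j + 1 - PySem.Int.mod v n then j + 1 - PySem.Int.mod v n
        else j + 1 - PySem.Int.mod v n + n := by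
    rw [hH0, pv_mod_add_mul n _ _ hn]
    split
    · rename_i h; rw [h]; exact pv_mod_self n hn
    · rename_i h; exact pv_mod_range n _ hn (by omega) (by omega)
  have hM : PySem.Int.mod (j - k) n = if 0 ≤ j - k then j - k else j - k + n :=
    pv_mod_range n _ hn (by omega) (by omega)
  rw [hL, hH, hM]
  split_ifs <;> omega

-- length bookkeeping
theorem pv_len_stepA (n : Int) (d : List Int) (p : Int × Int) : (pvStepA n d p).length = d.length := by
  simp only [pvStepA]
  split <;> simp [PySem.List.length_pySetD]

-- one diff step adds exactly the scoring indicator to the prefix sum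
theorem pvP_stepA (nums : List Int) (d : List Int) (p : Int × Int) (k : Nat)
    (hd : d.length = nums.length) (hk : k < nums.length)
    (hp1 : 0 ≤ p.1) (hp2 : p.1 < (nums.length : Int)) :
    pvP (k + 1) (pvStepA (nums.length : Int) d p)
      = pvP (k + 1) d
        + (if PySem.Int.mod p.2 (nums.length : Int) ≤ PySem.Int.mod (p.1 - (k : Int)) (nums.length : Int)
           then (1 : Int) else 0) := by
  have hn : (0 : Int) < (nums.length : Int) := by exact_mod_cast Nat.zero_lt_of_lt hk
  have hL1 : 0 ≤ PySem.Int.mod (p.1 + 1) (nums.length : Int) := PySem.Int.mod_nonneg _ hn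
  have hL2 : PySem.Int.mod (p.1 + 1) (nums.length : Int) < (nums.length : Int) := PySem.Int.mod_lt _ hn
  have hH1 : 0 ≤ PySem.Int.mod (p.1 - p.2 + (nums.length : Int) + 1) (nums.length : Int) := PySem.Int.mod_nonneg _ hn
  have hH2 : PySem.Int.mod (p.1 - p.2 + (nums.length : Int) + 1) (nums.length : Int) < (nums.length : Int) := PySem.Int.mod_lt _ hn
  have harith := pvArith (nums.length : Int) p.1 p.2 (k : Int) hn hp1 hp2 (by exact_mod_cast Nat.zero_le k) (by exact_mod_cast hk)
  simp only [pvStepA]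
  rw [PySem.List.pySetD_of_nonneg _ _ hL1, pv_pyGetD _ _ hL1]
  rw [PySem.List.pySetD_of_nonneg _ _ hH1, pv_pyGetD _ _ hH1]
  set L := PySem.Int.mod (p.1 + 1) (nums.length : Int) with hLdef
  set H := PySem.Int.mod (p.1 - p.2 + (nums.length : Int) + 1) (nums.length : Int) with hHdef
  set d1 := d.set L.toNat (d.getD L.toNat 0 + 1) with hd1
  set d2 := d1.set H.toNat (d1.getD H.toNat 0 - 1) with hd2
  have hlen1 : d1.length = nums.length := by rw [hd1]; simp [hd]
  have hlen2 : d2.length = nums.length := by rw [hd2]; simp [hlen1]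
  have e1 : pvP (k + 1) d1 = pvP (k + 1) d + (if L.toNat < k + 1 then 1 else 0) := by
    rw [hd1, pvP_set d L.toNat _ (k + 1) (by omega)]
    split_ifs <;> ring
  have e2 : pvP (k + 1) d2 = pvP (k + 1) d1 + (if H.toNat < k + 1 then -1 else 0) := by
    rw [hd2, pvP_set d1 H.toNat _ (k + 1) (by omega)]
    split_ifs <;> ring
  split
  · rename_i hge
    rw [PySem.List.pySetD_of_nonneg _ _ (by norm_num : (0:Int) ≤ 0), pv_pyGetD _ _ (by norm_num : (0:Int) ≤ 0)]
    rw [pvP_set d2 _ _ (k + 1) (by simp [hlen2]; omega)]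
    rw [e2, e1, ← harith]
    split_ifs <;> omega
  · rename_i hge
    rw [e2, e1, ← harith]
    split_ifs <;> omega

-- folding A's first loop: prefix sums of diff are the scores
theorem pvP_foldA (nums : List Int) (l : List (Int × Int)) (d : List Int) (k : Nat)
    (hd : d.length = nums.length) (hk : k < nums.length)
    (hl : ∀ p ∈ l, 0 ≤ p.1 ∧ p.1 < (nums.length : Int)) :
    pvP (k + 1) (l.foldl (pvStepA (nums.length : Int)) d)
      = pvP (k + 1) d
        + (l.map (fun p =>
            if PySem.Int.mod p.2 (nums.length : Int) ≤ PySem.Int.mod (p.1 - (k : Int)) (nums.length : Int)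
            then (1 : Int) else 0)).sum := by
  induction l generalizing d with
  | nil => simp
  | cons p l ih =>
    rw [List.foldl_cons, ih _ (by rw [pv_len_stepA]; exact hd) (fun q hq => hl q (List.mem_cons_of_mem _ hq)),
        pvP_stepA nums d p k hd hk (hl p (List.mem_cons_self)).1 (hl p (List.mem_cons_self)).2]
    simp; ring

theorem pv_enum_bounds (nums : List Int) (p : Int × Int) (h : p ∈ PySem.List.enumerate nums) :
    0 ≤ p.1 ∧ p.1 < (nums.length : Int) := by
  have h2 := List.mem_map_of_mem (f := (·.1)) h
  rw [PySem.List.map_fst_enumerate] at h2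
  have h3 := (PySem.List.mem_pyRange_one).1 h2
  simp at h3
  exact ⟨h3.1, by have := h3.2; omega⟩

theorem pvP_replicate (n m : Nat) : pvP m (List.replicate n (0 : Int)) = 0 := by
  induction m with
  | zero => rfl
  | succ m ih =>
    rw [pvP_succ, ih]
    simp [List.getD_eq_getElem?_getD, List.getElem?_replicate]
    split <;> rfl

-- conclusion of the first-loop analysis of A
theorem pv_diff_score (nums : List Int) (k : Nat) (hk : k < nums.length) :
    pvP (k + 1) ((PySem.List.enumerate nums).foldl (pvStepA (nums.length : Int)) (List.replicate nums.length 0))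
      = pvScore nums (k : Int) := by
  rw [pvP_foldA nums _ _ k (by simp) hk (fun p hp => pv_enum_bounds nums p hp), pvP_replicate]
  simp [pvScore]

-- ===== B-side lemmas =====

theorem pv_len_stepC (n : Int) (c : List Int) (p : Int × Int) : (pvStepC n c p).length = c.length := by
  simp [pvStepC, PySem.List.length_pySetD]

-- folding B's counter loop: c[r] counts the elements whose score interval ends at r
theorem pv_foldC (nums : List Int) (l : List (Int × Int)) (c : List Int) (r : Nat)
    (hc : c.length = nums.length) (hr : r < nums.length) :
    (l.foldl (pvStepC (nums.length : Int)) c).getD r 0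
      = c.getD r 0
        + (l.map (fun p =>
            if PySem.Int.mod (p.1 - PySem.Int.mod p.2 (nums.length : Int)) (nums.length : Int) = (r : Int)
            then (1 : Int) else 0)).sum := by
  have hn : (0 : Int) < (nums.length : Int) := by exact_mod_cast Nat.zero_lt_of_lt hr
  induction l generalizing c with
  | nil => simp
  | cons p l ih =>
    have hi1 : 0 ≤ PySem.Int.mod (p.1 - PySem.Int.mod p.2 (nums.length : Int)) (nums.length : Int) :=
      PySem.Int.mod_nonneg _ hn
    have hi2 : PySem.Int.mod (p.1 - PySem.Int.mod p.2 (nums.length : Int)) (nums.length : Int) < (nums.length : Int) :=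
      PySem.Int.mod_lt _ hn
    rw [List.foldl_cons, ih _ (by rw [pv_len_stepC]; exact hc)]
    simp only [pvStepC]
    rw [PySem.List.pySetD_of_nonneg _ _ hi1, pv_pyGetD _ _ hi1]
    rw [pv_getD_set c _ _ r (by omega)]
    simp only [List.map_cons, List.sum_cons]
    by_cases he : r = (PySem.Int.mod (p.1 - PySem.Int.mod p.2 (nums.length : Int)) (nums.length : Int)).toNat
    · rw [if_pos he, if_pos (by omega), he]; ring
    · rw [if_neg he, if_neg (by omega)]; ring

-- per-element recurrence: going from rotation k-1 to k, an element keeps scoring unless its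
-- interval ends at k-1, and the element at index k-1 starts scoring again
theorem pv_elem_rec (n j v k : Int) (hn : 0 < n) (hj1 : 0 ≤ j) (hj2 : j < n) (hk1 : 1 ≤ k) (hk2 : k < n) :
    (if PySem.Int.mod v n ≤ PySem.Int.mod (j - k) n then (1 : Int) else 0)
      = (if PySem.Int.mod v n ≤ PySem.Int.mod (j - (k - 1)) n then (1 : Int) else 0)
        + (if j = k - 1 then (1 : Int) else 0)
        - (if PySem.Int.mod (j - PySem.Int.mod v n) n = k - 1 then (1 : Int) else 0) := by
  have hW1 : 0 ≤ PySem.Int.mod v n := PySem.Int.mod_nonneg v hn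
  have hW2 : PySem.Int.mod v n < n := PySem.Int.mod_lt v hn
  have hM : PySem.Int.mod (j - k) n = if 0 ≤ j - k then j - k else j - k + n :=
    pv_mod_range n _ hn (by omega) (by omega)
  have hM' : PySem.Int.mod (j - (k - 1)) n = if 0 ≤ j - (k - 1) then j - (k - 1) else j - (k - 1) + n :=
    pv_mod_range n _ hn (by omega) (by omega)
  have hE : PySem.Int.mod (j - PySem.Int.mod v n) n
      = if 0 ≤ j - PySem.Int.mod v n then j - PySem.Int.mod v n else j - PySem.Int.mod v n + n :=
    pv_mod_range n _ hn (by omega) (by omega)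
  rw [hM, hM', hE]
  split_ifs <;> omega

-- exactly one index of enumerate equals a given in-range constant
theorem pv_enum_count {α : Type} (xs : List α) (s c : Int) :
    ((PySem.List.enumerate xs s).map (fun p => if p.1 = c then (1 : Int) else 0)).sum
      = if s ≤ c ∧ c < s + (xs.length : Int) then 1 else 0 := by
  induction xs generalizing s with
  | nil =>
    rw [PySem.List.enumerate_nil]
    simp only [List.map_nil, List.sum_nil, List.length_nil, Nat.cast_zero, add_zero]
    rw [if_neg (by omega)]
  | cons x xs ih =>
    rw [PySem.List.enumerate_cons, List.map_cons, List.sum_cons, ih (s + 1)]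
    simp only [List.length_cons]
    push_cast
    split_ifs <;> omega

-- sum of a three-way pointwise combination
theorem pv_sum_comb {α : Type} (l : List α) (f g h : α → Int) :
    (l.map (fun p => f p + g p - h p)).sum = (l.map f).sum + (l.map g).sum - (l.map h).sum := by
  induction l with
  | nil => simp
  | cons p l ih => simp only [List.map_cons, List.sum_cons, ih]; ring

-- the score recurrence, summed over all elements
theorem pv_score_rec (nums : List Int) (k : Int) (hk1 : 1 ≤ k) (hk2 : k < (nums.length : Int)) :
    pvScore nums k
      = pvScore nums (k - 1) + 1
        - ((PySem.List.enumerate nums).map (fun p =>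
            if PySem.Int.mod (p.1 - PySem.Int.mod p.2 (nums.length : Int)) (nums.length : Int) = k - 1
            then (1 : Int) else 0)).sum := by
  have hn : (0 : Int) < (nums.length : Int) := by omega
  unfold pvScore
  have hcongr : (PySem.List.enumerate nums).map (fun p =>
      if PySem.Int.mod p.2 (nums.length : Int) ≤ PySem.Int.mod (p.1 - k) (nums.length : Int)
      then (1 : Int) else 0)
    = (PySem.List.enumerate nums).map (fun p =>
      (if PySem.Int.mod p.2 (nums.length : Int) ≤ PySem.Int.mod (p.1 - (k - 1)) (nums.length : Int)
       then (1 : Int) else 0)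
      + (if p.1 = k - 1 then (1 : Int) else 0)
      - (if PySem.Int.mod (p.1 - PySem.Int.mod p.2 (nums.length : Int)) (nums.length : Int) = k - 1
         then (1 : Int) else 0)) := by
    apply List.map_congr_left
    intro p hp
    have hb := pv_enum_bounds nums p hp
    exact pv_elem_rec (nums.length : Int) p.1 p.2 k hn hb.1 hb.2 hk1 hk2
  rw [hcongr, pv_sum_comb, pv_enum_count nums 0 (k - 1), if_pos (by omega)]

-- the directly counted s0 of B is the score of rotation 0
theorem pv_s0 (nums : List Int) :
    ((PySem.List.enumerate nums).map
        (fun p => if PySem.Int.mod p.2 (nums.length : Int) ≤ p.1 then (1 : Int) else 0)).sum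
      = pvScore nums 0 := by
  unfold pvScore
  apply congrArg
  apply List.map_congr_left
  intro p hp
  have hb := pv_enum_bounds nums p hp
  have hn : (0 : Int) < (nums.length : Int) := by omega
  rw [show p.1 - 0 = p.1 by ring, pv_mod_small _ _ hn hb.1 hb.2]

-- the value of B's counter at residue k-1
theorem pv_getD_replicate (n r : Nat) : (List.replicate n (0 : Int)).getD r 0 = 0 := by
  simp [List.getD_eq_getElem?_getD, List.getElem?_replicate]
  split <;> rfl

theorem pv_c_val (nums : List Int) (k : Int) (hk1 : 1 ≤ k) (hk2 : k < (nums.length : Int)) :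
    PySem.List.pyGetD ((PySem.List.enumerate nums).foldl (pvStepC (nums.length : Int)) (List.replicate nums.length 0)) (k - 1) 0
      = ((PySem.List.enumerate nums).map (fun p =>
          if PySem.Int.mod (p.1 - PySem.Int.mod p.2 (nums.length : Int)) (nums.length : Int) = k - 1
          then (1 : Int) else 0)).sum := by
  rw [pv_pyGetD _ _ (by omega), pv_foldC nums _ _ (k - 1).toNat (by simp) (by omega)]
  rw [pv_getD_replicate, Int.toNat_of_nonneg (by omega : 0 ≤ k - 1)]
  ring

-- the two second loops stay in lockstep
theorem pv_loop2 (nums : List Int) (diff c : List Int) (s0 : Int)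
    (hs : ∀ k : Nat, k < nums.length → pvP (k + 1) diff = pvScore nums (k : Int))
    (hrec : ∀ k : Int, 1 ≤ k → k < (nums.length : Int) →
        pvScore nums k = pvScore nums (k - 1) + 1 - PySem.List.pyGetD c (k - 1) 0)
    (hs0 : s0 = pvScore nums 0) (m : Nat) (hm : m ≤ nums.length) :
    (PySem.List.pyRange 0 (m : Int) 1).foldl
        (fun (s : Int × Int × Int) i =>
          let now := s.2.1 + PySem.List.pyGetD diff i 0
          if now > s.1 then (now, now, i) else (s.1, now, s.2.2)) (0, 0, -1)
      = (((PySem.List.pyRange 0 (m : Int) 1).foldl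
            (fun (st : Int × Int × Int) k =>
              let s := if k ≠ 0 then st.1 + 1 - PySem.List.pyGetD c (k - 1) 0 else st.1
              if s > st.2.1 then (s, s, k) else (s, st.2.1, st.2.2)) (s0, 0, -1)).2.1,
         pvP m diff,
         ((PySem.List.pyRange 0 (m : Int) 1).foldl
            (fun (st : Int × Int × Int) k =>
              let s := if k ≠ 0 then st.1 + 1 - PySem.List.pyGetD c (k - 1) 0 else st.1
              if s > st.2.1 then (s, s, k) else (s, st.2.1, st.2.2)) (s0, 0, -1)).2.2)
      ∧ ((PySem.List.pyRange 0 (m : Int) 1).foldl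
            (fun (st : Int × Int × Int) k =>
              let s := if k ≠ 0 then st.1 + 1 - PySem.List.pyGetD c (k - 1) 0 else st.1
              if s > st.2.1 then (s, s, k) else (s, st.2.1, st.2.2)) (s0, 0, -1)).1
          = (if m = 0 then s0 else pvScore nums ((m : Int) - 1)) := by
  induction m with
  | zero =>
    rw [show ((0 : Nat) : Int) = 0 by norm_num, PySem.List.pyRange_one_eq_nil le_rfl]
    exact ⟨by simp [pvP], by simp⟩
  | succ m ih =>
    have hm' : m ≤ nums.length := Nat.le_of_succ_le hm
    have hr : PySem.List.pyRange 0 ((m + 1 : Nat) : Int) 1 = PySem.List.pyRange 0 (m : Int) 1 ++ [(m : Int)] := by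
      push_cast
      exact PySem.List.pyRange_one_succ_right (by exact_mod_cast Nat.zero_le m)
    rw [hr]
    simp only [List.foldl_append, List.foldl_cons, List.foldl_nil]
    set Bm := (PySem.List.pyRange 0 (m : Int) 1).foldl
            (fun (st : Int × Int × Int) k =>
              let s := if k ≠ 0 then st.1 + 1 - PySem.List.pyGetD c (k - 1) 0 else st.1
              if s > st.2.1 then (s, s, k) else (s, st.2.1, st.2.2)) (s0, 0, -1) with hBm
    obtain ⟨ih1, ih2⟩ := ih hm'
    rw [ih1]
    have hget : PySem.List.pyGetD diff ((m : Nat) : Int) 0 = diff.getD m 0 := by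
      rw [PySem.List.pyGetD_natCast]
    have hPs : pvP m diff + diff.getD m 0 = pvScore nums (m : Int) := by
      rw [← pvP_succ]; exact hs m (by omega)
    have hsB : (if ((m : Nat) : Int) ≠ 0 then Bm.1 + 1 - PySem.List.pyGetD c (((m : Nat) : Int) - 1) 0 else Bm.1)
        = pvScore nums (m : Int) := by
      by_cases hm0 : m = 0
      · subst hm0; simp [ih2, hs0]
      · rw [if_pos (by exact_mod_cast hm0), ih2, if_neg hm0]
        exact (hrec (m : Int) (by exact_mod_cast Nat.one_le_iff_ne_zero.mpr hm0) (by exact_mod_cast hm)).symm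
    have hP1 : pvP (m + 1) diff = pvScore nums (m : Int) := hs m (by omega)
    have hc1 : ((m + 1 : Nat) : Int) - 1 = (m : Int) := by push_cast; ring
    simp only [hget, hPs, hsB, hP1, hc1, if_neg (Nat.succ_ne_zero m)]
    by_cases hgt : pvScore nums (m : Int) > Bm.2.1
    · simp [hgt]
    · simp [hgt]

-- ===== VERDICT (by name: the statement is the Claim_ definition above) =====
theorem bestRotation_spec : Claim_equal_bestRotation := by
  intro nums _
  unfold Spec_bestRotation bestRotation bestRotation_alt
  have h := pv_loop2 nums
    ((PySem.List.enumerate nums).foldl (pvStepA (nums.length : Int)) (List.replicate nums.length 0))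
    ((PySem.List.enumerate nums).foldl (pvStepC (nums.length : Int)) (List.replicate nums.length 0))
    (((PySem.List.enumerate nums).map
        (fun p => if PySem.Int.mod p.2 (nums.length : Int) ≤ p.1 then (1 : Int) else 0)).sum)
    (fun k hk => pv_diff_score nums k hk)
    (fun k hk1 hk2 => by rw [pv_score_rec nums k hk1 hk2, pv_c_val nums k hk1 hk2])
    (pv_s0 nums) nums.length le_rfl
  simp only [h.1]
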